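-- pv_equiv track=rewrite | github.com/crick-pipelines-stp/crick-genome-tools | crick_genome_tools/seq/utils.py | cumulative_hamming_distance
-- ===== SOURCE A (Python) =====
-- def hamming_distance(seq1, seq2):
--     """
--     Calculate the Hamming distance between two sequences.
--     The Hamming distance is the number of positions at which the corresponding characters are different.
--     If the sequences are of different lengths, the Hamming distance is calculated as the sum of:
--     - The Hamming distance for the common length
--     - The absolute difference in length between the two sequences
--
--     Args:
--         seq1 (str): The first sequence.
--         seq2 (str): The second sequence.
--
--     Returns:
--         int: The Hamming distance between the two sequences.
--     """
--     # Calculate the base Hamming distance for the common length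
--     min_len = min(len(seq1), len(seq2))
--     distance = sum(c1 != c2 for c1, c2 in zip(seq1[:min_len], seq2[:min_len]))
--
--     # Add the penalty for length difference
--     distance += abs(len(seq1) - len(seq2))
--
--     return distance
--
-- def cumulative_hamming_distance(dict1, dict2):
--     """
--     Calculate the cumulative Hamming distance between two dictionaries of sequences.
--
--     The function compares sequences stored in two dictionaries (dict1 and dict2) by their keys.
--     If a key exists in only one dictionary, the sequence from the other dictionary is considered
--     an empty string, and the total distance for that entry is the full length of the sequence.
--     The Hamming distance is calculated for each matching entry and summed up to get the total.
--
--     Args: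
--         dict1 (dict): A dictionary where keys are sequence identifiers and values are sequences (strings).
--         dict2 (dict): A second dictionary with the same structure as dict1.
--
--     Returns:
--         int: The total cumulative Hamming distance between all matching entries in the two dictionaries.
--     """
--
--     total_distance = 0
--     all_keys = set(dict1.keys()).union(set(dict2.keys()))  # Collect all unique keys
--
--     for key in all_keys:
--         seq1 = dict1.get(key, "")  # Get sequence from dict1 or empty string if missing
--         seq2 = dict2.get(key, "")  # Get sequence from dict2 or empty string if missing
--         total_distance += hamming_distance(seq1, seq2)
--
--     return total_distance
-- ===== SOURCE B (Python) =====
-- def cumulative_hamming_distance(dict1, dict2):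
--     # Start from the sum of all sequence lengths, then subtract the "matching
--     # credit" min(len1,len2) + #equal-positions for every key present in both
--     # dicts (hamming(s1,s2) = len1 + len2 - (min(len1,len2) + equal_positions)).
--     total = sum(map(len, dict1.values())) + sum(map(len, dict2.values()))
--     for key, seq2 in dict2.items():
--         seq1 = dict1.get(key)
--         if seq1 is not None:
--             total -= min(len(seq1), len(seq2)) + sum(a == b for a, b in zip(seq1, seq2))
--     return total
-- ===== Notes on version B (the rewrite author's own statement) =====
-- stated objective: alternative
-- what changed: B computes no Hamming distance and no key union: it starts from the sum of all sequence lengths in both dicts and, in one pass over dict2's items, subtracts a 'matching credit' min(len1,len2) + number-of-EQUAL-positions for each key also present in dict1, using the identity hamming(s1,s2) = len1 + len2 - (min(len1,len2) + equal_positions). (no set objects, no union, no per-key defaulted double lookups; a single items() pass)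
import Mathlib
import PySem

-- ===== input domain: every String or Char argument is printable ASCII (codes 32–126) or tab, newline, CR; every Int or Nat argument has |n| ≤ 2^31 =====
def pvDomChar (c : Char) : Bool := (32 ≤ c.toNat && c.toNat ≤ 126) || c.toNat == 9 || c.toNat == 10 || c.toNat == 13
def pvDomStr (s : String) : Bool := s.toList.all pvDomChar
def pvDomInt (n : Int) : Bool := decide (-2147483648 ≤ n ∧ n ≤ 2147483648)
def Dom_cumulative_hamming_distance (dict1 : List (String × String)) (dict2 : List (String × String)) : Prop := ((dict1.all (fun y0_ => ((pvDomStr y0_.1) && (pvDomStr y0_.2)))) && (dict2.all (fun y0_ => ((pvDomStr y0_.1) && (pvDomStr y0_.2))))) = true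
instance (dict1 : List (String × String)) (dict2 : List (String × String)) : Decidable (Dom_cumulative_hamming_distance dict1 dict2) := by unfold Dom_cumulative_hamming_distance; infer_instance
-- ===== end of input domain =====

-- B inverts the arithmetic: it starts from the sum of all sequence lengths in both dicts and
-- subtracts a "matching credit" (min length + number of equal positions) for each shared key,
-- never computing a Hamming distance or a key union; objective: alternative.

-- ===== PORT A =====
-- hamming_distance(seq1, seq2): zip over the [:min_len] slices, plus abs length difference
def pvHammingA (seq1 seq2 : String) : Int :=
  let min_len : Int := min (PySem.Str.len seq1) (PySem.Str.len seq2)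
  let distance : Int :=
    ((PySem.List.slice seq1.toList none (some min_len)).zip
      (PySem.List.slice seq2.toList none (some min_len))).foldl
      (fun acc p => acc + (if p.1 ≠ p.2 then 1 else 0)) 0
  distance + ((PySem.Str.len seq1 - PySem.Str.len seq2).natAbs : Int)

def cumulative_hamming_distance (dict1 : List (String × String)) (dict2 : List (String × String)) : Int :=
  let d1 := PySem.Dict.mk dict1
  let d2 := PySem.Dict.mk dict2
  let all_keys := PySem.Set.union (PySem.Set.ofList (PySem.Dict.keys d1)) (PySem.Set.ofList (PySem.Dict.keys d2))
  all_keys.foldl (fun acc key => acc + pvHammingA (d1.getD key "") (d2.getD key "")) 0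

-- ===== PORT B =====
def cumulative_hamming_distance_alt (dict1 : List (String × String)) (dict2 : List (String × String)) : Int :=
  let d1 := PySem.Dict.mk dict1
  let d2 := PySem.Dict.mk dict2
  let total0 : Int := (d1.values.map PySem.Str.len).sum + (d2.values.map PySem.Str.len).sum
  -- for key, seq2 in dict2.items(): seq1 = dict1.get(key); if seq1 is not None: subtract credit
  d2.items.foldl (fun total p =>
    match d1.get? p.1 with
    | some seq1 =>
        total - (min (PySem.Str.len seq1) (PySem.Str.len p.2)
          + (seq1.toList.zip p.2.toList).foldl (fun a q => a + (if q.1 == q.2 then 1 else 0)) 0)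
    | none => total) total0

-- ===== PRECONDITION & SPEC =====
-- Pre_ requires the keys of each association list to be distinct: a Python dict cannot hold
-- duplicate keys, so lists with duplicates do not encode any input A actually receives.
def Pre_cumulative_hamming_distance (dict1 : List (String × String)) (dict2 : List (String × String)) : Prop :=
  (dict1.map Prod.fst).Nodup ∧ (dict2.map Prod.fst).Nodup
instance (dict1 : List (String × String)) (dict2 : List (String × String)) : Decidable (Pre_cumulative_hamming_distance dict1 dict2) := by unfold Pre_cumulative_hamming_distance; infer_instance

def pvWitness_cumulative_hamming_distance : (List (String × String)) × (List (String × String)) :=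
  ([("r1", "ACGT"), ("r2", "AC")], [("r1", "ACCT"), ("r3", "G")])

def Spec_cumulative_hamming_distance (dict1 : List (String × String)) (dict2 : List (String × String)) (out : Int) : Prop := out = cumulative_hamming_distance_alt dict1 dict2
instance (dict1 : List (String × String)) (dict2 : List (String × String)) (out : Int) : Decidable (Spec_cumulative_hamming_distance dict1 dict2 out) := by unfold Spec_cumulative_hamming_distance; infer_instance

-- ===== CLAIM (what is proved, stated in full; the proofs are below) =====
def Claim_equal_cumulative_hamming_distance : Prop := ∀ (dict1 : List (String × String)) (dict2 : List (String × String)), Dom_cumulative_hamming_distance dict1 dict2 → Pre_cumulative_hamming_distance dict1 dict2 → Spec_cumulative_hamming_distance dict1 dict2 (cumulative_hamming_distance dict1 dict2)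

-- ===== LEMMAS AND PROOFS =====

theorem pv_foldl_add {α : Type} (f : α → Int) : ∀ (l : List α) (init : Int),
    l.foldl (fun a k => a + f k) init = init + (l.map f).sum := by
  intro l
  induction l with
  | nil => simp
  | cons x t ih => intro init; simp [List.foldl_cons, ih]; ring

theorem pv_foldl_sub {α : Type} (f : α → Int) : ∀ (l : List α) (init : Int),
    l.foldl (fun a k => a - f k) init = init - (l.map f).sum := by
  intro l
  induction l with
  | nil => simp
  | cons x t ih => intro init; simp [List.foldl_cons, ih]; ring

theorem pv_take_zip : ∀ (l1 l2 : List Char),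
    (l1.take (min l1.length l2.length)).zip (l2.take (min l1.length l2.length)) = l1.zip l2 := by
  intro l1
  induction l1 with
  | nil => intro l2; simp
  | cons a t ih =>
    intro l2
    cases l2 with
    | nil => simp
    | cons b u => simp [Nat.succ_min_succ, ih u]

-- zipping the two [:min_len] slices is zipping the full lists
theorem pv_zip_slice (l1 l2 : List Char) :
    (PySem.List.slice l1 none (some (min (l1.length : Int) (l2.length : Int)))).zip
      (PySem.List.slice l2 none (some (min (l1.length : Int) (l2.length : Int)))) = l1.zip l2 := by
  have h0 : (0 : Int) ≤ min (l1.length : Int) (l2.length : Int) := by positivity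
  rw [PySem.List.slice_to _ h0, PySem.List.slice_to _ h0]
  have h : (min (l1.length : Int) (l2.length : Int)).toNat = min l1.length l2.length := by omega
  rw [h, pv_take_zip]

-- the number of equal positions, B's counter
def pvEq (s1 s2 : String) : Int :=
  (s1.toList.zip s2.toList).foldl (fun a q => a + (if q.1 == q.2 then 1 else 0)) 0

-- B's matching credit for a shared key
def pvCredit (s1 s2 : String) : Int :=
  min (PySem.Str.len s1) (PySem.Str.len s2) + pvEq s1 s2

theorem pv_mismatch_plus_eq : ∀ (l : List (Char × Char)),
    ((l.map (fun p => if p.1 ≠ p.2 then (1 : Int) else 0)).sum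
      + (l.map (fun p => if p.1 == p.2 then (1 : Int) else 0)).sum) = (l.length : Int) := by
  intro l
  induction l with
  | nil => simp
  | cons x t ih =>
    simp only [List.map_cons, List.sum_cons, List.length_cons, Nat.cast_add, Nat.cast_one]
    have hx : (if x.1 ≠ x.2 then (1 : Int) else 0) + (if x.1 == x.2 then (1 : Int) else 0) = 1 := by
      by_cases h : x.1 = x.2 <;> simp [h]
    omega

-- hamming(s1,s2) = len1 + len2 - credit(s1,s2)
theorem pvHammingA_eq_credit (s1 s2 : String) :
    pvHammingA s1 s2 = PySem.Str.len s1 + PySem.Str.len s2 - pvCredit s1 s2 := by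
  unfold pvHammingA pvCredit pvEq
  simp only [PySem.Str.len_eq]
  rw [pv_zip_slice, pv_foldl_add, pv_foldl_add]
  have hlen := pv_mismatch_plus_eq (s1.toList.zip s2.toList)
  have hz : (s1.toList.zip s2.toList).length = min s1.toList.length s2.toList.length :=
    List.length_zip
  rw [hz] at hlen
  omega

theorem pv_getD_of_not_mem (d : PySem.Dict String String) (k : String) (h : k ∉ d.keys) :
    d.getD k "" = "" := by
  have hc : ¬ d.contains k = true := fun hc => h ((PySem.Dict.contains_iff_mem_keys d k).mp hc)
  apply PySem.Dict.getD_of_not_contains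
  simpa using hc

theorem pvCredit_right_empty (s : String) : pvCredit s "" = 0 := by
  unfold pvCredit pvEq
  simp [PySem.Str.len_eq]

theorem pv_sum_split {α : Type} (a b c : α → Int) : ∀ (l : List α),
    (l.map (fun k => a k + b k - c k)).sum
      = (l.map a).sum + (l.map b).sum - (l.map c).sum := by
  intro l
  induction l with
  | nil => simp
  | cons x t ih => simp [ih]; ring


-- sum over a superset with zeros outside: ∀ x ∈ extra, f x = 0
theorem pv_sum_eq_of_zero {α : Type} (f : α → Int) (l extra : List α)
    (h : ∀ x ∈ extra, f x = 0) : ((l ++ extra).map f).sum = (l.map f).sum := by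
  have : (extra.map f).sum = 0 := by
    induction extra with
    | nil => simp
    | cons x t ih =>
      simp only [List.map_cons, List.sum_cons]
      rw [h x (by simp), ih (fun y hy => h y (by simp [hy]))]
      simp
  simp [this]

-- permutation of two nodup lists with equal membership
theorem pv_perm_of_mem {α : Type} [DecidableEq α] (l1 l2 : List α) (h1 : l1.Nodup)
    (h2 : l2.Nodup) (h : ∀ x, x ∈ l1 ↔ x ∈ l2) : l1.Perm l2 :=
  (List.perm_ext_iff_of_nodup h1 h2).mpr h


-- proof-side name for B's loop subtrahend
def pvG (d1 : PySem.Dict String String) (p : String × String) : Int :=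
  match d1.get? p.1 with
  | some seq1 =>
      min (PySem.Str.len seq1) (PySem.Str.len p.2)
        + (seq1.toList.zip p.2.toList).foldl (fun a q => a + (if q.1 == q.2 then 1 else 0)) 0
  | none => 0

theorem pv_not_contains_iff (l : List String) (x : String) :
    ((!PySem.Set.contains l x) = true) ↔ x ∉ l := by
  rw [Bool.not_eq_true']
  constructor
  · intro h hx
    have := (PySem.Set.contains_iff l x).mpr hx
    rw [h] at this; exact absurd this (by simp)
  · intro h
    by_contra hc
    simp only [Bool.not_eq_false] at hc
    exact h ((PySem.Set.contains_iff l x).mp hc)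

-- ===== VERDICT (by name: the statement is the Claim_ definition above) =====
theorem cumulative_hamming_distance_spec : Claim_equal_cumulative_hamming_distance := by
  intro dict1 dict2 _ hpre
  obtain ⟨hn1, hn2⟩ := hpre
  unfold Spec_cumulative_hamming_distance cumulative_hamming_distance cumulative_hamming_distance_alt
  set d1 := PySem.Dict.mk dict1 with hd1
  set d2 := PySem.Dict.mk dict2 with hd2
  have hk1nd : d1.keys.Nodup := by
    simpa [hd1, PySem.Dict.keys] using hn1
  have hk2nd : d2.keys.Nodup := by
    simpa [hd2, PySem.Dict.keys] using hn2
  have hofl1 : PySem.Set.ofList d1.keys = d1.keys := PySem.Set.ofList_eq_self_of_nodup _ hk1nd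
  have hofl2 : PySem.Set.ofList d2.keys = d2.keys := PySem.Set.ofList_eq_self_of_nodup _ hk2nd
  -- name the key groups
  set extra := d2.keys.filter (fun y => !(PySem.Set.contains d1.keys y)) with hextra
  set rest2 := d1.keys.filter (fun y => !(PySem.Set.contains d2.keys y)) with hrest2
  have hU : PySem.Set.union (PySem.Set.ofList d1.keys) (PySem.Set.ofList d2.keys)
      = d1.keys ++ extra := by
    rw [hofl1, hofl2]
    show PySem.Set.update d1.keys d2.keys = _
    rw [PySem.Set.update_eq_append_filter, hofl2]
  -- rewrite B's loop body as a subtraction of pvG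
  have hbody : (fun (total : Int) (p : String × String) =>
      match d1.get? p.1 with
      | some seq1 =>
          total - (min (PySem.Str.len seq1) (PySem.Str.len p.2)
            + (seq1.toList.zip p.2.toList).foldl (fun a q => a + (if q.1 == q.2 then 1 else 0)) 0)
      | none => total)
      = fun total p => total - pvG d1 p := by
    funext t p
    unfold pvG
    cases d1.get? p.1 <;> simp
  simp only [hU, hbody]
  simp only [pv_foldl_add, pv_foldl_sub, pvHammingA_eq_credit]
  rw [pv_sum_split (fun k => PySem.Str.len (d1.getD k ""))
      (fun k => PySem.Str.len (d2.getD k "")) (fun k => pvCredit (d1.getD k "") (d2.getD k ""))]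
  -- (1) sum of dict1 lengths over the union collapses onto d1.keys, i.e. d1.values
  have hz1 : ∀ x ∈ extra, PySem.Str.len (d1.getD x "") = 0 := by
    intro x hx
    rw [hextra, List.mem_filter] at hx
    rw [pv_getD_of_not_mem d1 x ((pv_not_contains_iff _ _).mp hx.2)]
    simp [PySem.Str.len_eq]
  have h1 : ((d1.keys ++ extra).map (fun k => PySem.Str.len (d1.getD k ""))).sum
      = (d1.values.map PySem.Str.len).sum := by
    rw [pv_sum_eq_of_zero _ _ _ hz1, PySem.Dict.values_eq_map_keys d1 hk1nd "", List.map_map]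
    rfl
  -- the union is a permutation of d2.keys ++ rest2
  have hnd_extra : extra.Nodup := hextra ▸ hk2nd.filter _
  have hnd_rest2 : rest2.Nodup := hrest2 ▸ hk1nd.filter _
  have hperm : (d1.keys ++ extra).Perm (d2.keys ++ rest2) := by
    apply pv_perm_of_mem
    · refine List.Nodup.append hk1nd hnd_extra ?_
      intro x hx hy
      rw [hextra, List.mem_filter] at hy
      exact (pv_not_contains_iff _ _).mp hy.2 hx
    · refine List.Nodup.append hk2nd hnd_rest2 ?_
      intro x hx hy
      rw [hrest2, List.mem_filter] at hy
      exact (pv_not_contains_iff _ _).mp hy.2 hx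
    · intro x
      simp only [List.mem_append, hextra, hrest2, List.mem_filter, pv_not_contains_iff]
      tauto
  -- (2) sum of dict2 lengths over the union collapses onto d2.keys, i.e. d2.values
  have hz2 : ∀ x ∈ rest2, PySem.Str.len (d2.getD x "") = 0 := by
    intro x hx
    rw [hrest2, List.mem_filter] at hx
    rw [pv_getD_of_not_mem d2 x ((pv_not_contains_iff _ _).mp hx.2)]
    simp [PySem.Str.len_eq]
  have h2 : ((d1.keys ++ extra).map (fun k => PySem.Str.len (d2.getD k ""))).sum
      = (d2.values.map PySem.Str.len).sum := by
    rw [(hperm.map _).sum_eq, pv_sum_eq_of_zero _ _ _ hz2,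
      PySem.Dict.values_eq_map_keys d2 hk2nd "", List.map_map]
    rfl
  -- (3) the credit sum over the union collapses onto d2.keys
  have hz3 : ∀ x ∈ rest2, pvCredit (d1.getD x "") (d2.getD x "") = 0 := by
    intro x hx
    rw [hrest2, List.mem_filter] at hx
    rw [pv_getD_of_not_mem d2 x ((pv_not_contains_iff _ _).mp hx.2), pvCredit_right_empty]
  have h3 : ((d1.keys ++ extra).map (fun k => pvCredit (d1.getD k "") (d2.getD k ""))).sum
      = (d2.keys.map (fun k => pvCredit (d1.getD k "") (d2.getD k ""))).sum := by
    rw [(hperm.map _).sum_eq, pv_sum_eq_of_zero _ _ _ hz3]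
  -- B's subtrahend over items is the same credit sum over d2.keys
  have hg : (d2.items.map (pvG d1)).sum
      = (d2.keys.map (fun k => pvCredit (d1.getD k "") (d2.getD k ""))).sum := by
    rw [PySem.Dict.items_eq_map_keys d2 hk2nd "", List.map_map]
    apply congrArg
    apply List.map_congr_left
    intro k _
    simp only [Function.comp_apply]
    unfold pvG pvCredit pvEq
    cases h : d1.get? k with
    | some s1 =>
      have hv1 : d1.getD k "" = s1 := by rw [PySem.Dict.getD_eq_get?_getD, h]; rfl
      simp only [hv1]
    | none =>
      have hv0 : d1.getD k "" = "" := by rw [PySem.Dict.getD_eq_get?_getD, h]; rfl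
      simp only [hv0]
      simp [PySem.Str.len_eq]
  rw [h1, h2, h3, hg]
  ring
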